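-- pv_equiv track=rewrite | github.com/han-kwang/wordle-optim | wordle-strategy.py | match_1word
-- ===== SOURCE A (Python) =====
-- def match_1word(word, pwords):
--     """Match probe words against word.
--
--     Return:
--
--     - hits1: set of letters that match
--     - hits2: set of matched (letter, pos) tuples.
--     - wlets: unique letters in the word
--     - badlets: set of bad letters
--     - badlets_p: list of bad letter sets by position
--     """
--     hits1 = set()  # letters
--     hits2 = set()  # (letter, pos) tuples
--     #hits2u = set() # letters in correct position
--     wlets = set(word)
--     plets = set()
--     badlets_p = [set() for _ in range(len(word))]
--     badlets = set()
--
--     for pw in pwords: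
--         hits1.update(wlets.intersection(set(pw)))
--         plets.update(set(pw))
--         badlets.update(set(pw) - wlets)
--         for i, let in enumerate(word):
--             if pw[i] == let:
--                 hits2.update([(let, i)])
--             else:
--                 badlets_p[i].add(pw[i])
--
--     return hits1, hits2, wlets, badlets, badlets_p
-- ===== SOURCE B (Python) =====
-- def match_1word(word, pwords):
--     """Two-pass rewrite: letter-level facts first (all probe letters as one
--     union, badlets as a closed-form set difference, hits1 by scanning the
--     target word against each probe's letter set), then the positional facts
--     (hits2 per probe, badlets_p as a transposed column comprehension)."""
--     wlets = set(word)
--     all_letters = set()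
--     hits1 = set()
--     for pw in pwords:
--         spw = set(pw)
--         all_letters |= spw
--         hits1.update(c for c in word if c in spw)
--     badlets = all_letters - wlets
--     hits2 = set()
--     for pw in pwords:
--         hits2.update((let, i) for i, let in enumerate(word) if pw[i] == let)
--     badlets_p = [{pw[i] for pw in pwords} - {let} for i, let in enumerate(word)]
--     return hits1, hits2, wlets, badlets, badlets_p
-- ===== Notes on version B (the rewrite author's own statement) =====
-- stated objective: simpler
-- what changed: A's single fused probe loop (per-probe set intersection/difference plus a nested positional loop mutating shared state) is replaced by a letter-level pass accumulating one union of probe letters with badlets derived as a closed-form set difference and hits1 by scanning the target word against each probe's letter set, plus a separate positional pass computing badlets_p as transposed per-position column sets; the unused plets set is dropped.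
import Mathlib
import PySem

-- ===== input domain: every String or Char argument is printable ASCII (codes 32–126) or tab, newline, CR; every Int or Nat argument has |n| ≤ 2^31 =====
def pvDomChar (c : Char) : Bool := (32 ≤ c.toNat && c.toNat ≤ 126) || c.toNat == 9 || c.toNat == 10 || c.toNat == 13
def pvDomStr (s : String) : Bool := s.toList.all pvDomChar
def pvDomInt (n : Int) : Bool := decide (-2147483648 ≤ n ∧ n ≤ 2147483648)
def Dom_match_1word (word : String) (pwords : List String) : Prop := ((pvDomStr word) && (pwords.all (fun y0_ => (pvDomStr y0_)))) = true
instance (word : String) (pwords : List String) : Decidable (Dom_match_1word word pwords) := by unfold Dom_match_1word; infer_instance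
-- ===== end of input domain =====

-- ===== PORT A =====
-- B restructures A's single fused probe loop into a letter-level pass (union + closed-form
-- difference) and a positional pass (transposed column sets); objective: simpler decomposition.
-- pvChars s = the 1-character strings of s (Python iterates/indexes a str as 1-char strings)
def pvChars (s : String) : List String := s.toList.map Char.toString

def match_1word (word : String) (pwords : List String) : List String × (List (String × Int)) × List String × List String × List (List String) :=
  let wchars := pvChars word
  let wlets : PySem.Set String := PySem.Set.ofList wchars
  -- state = (hits1, hits2, plets, badlets, badlets_p), exactly A's mutable locals
  let st := pwords.foldl
    (fun (st : PySem.Set String × PySem.Set (String × Int) × PySem.Set String × PySem.Set String × List (PySem.Set String)) pw =>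
      let pwc := pvChars pw
      let spw : PySem.Set String := PySem.Set.ofList pwc
      let hits1 := PySem.Set.update st.1 (PySem.Set.inter wlets spw)
      let plets := PySem.Set.update st.2.2.1 spw
      let badlets := PySem.Set.update st.2.2.2.1 (PySem.Set.diff spw wlets)
      -- for i, let in enumerate(word): pw[i] == let … (threads hits2 and badlets_p)
      let inner := wchars.zipIdx.foldl
        (fun (q : PySem.Set (String × Int) × List (PySem.Set String)) ci =>
          if PySem.List.pyGetD pwc (ci.2 : Int) "" = ci.1 then
            (PySem.Set.update q.1 [(ci.1, (ci.2 : Int))], q.2)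
          else
            (q.1, PySem.List.pySetD q.2 (ci.2 : Int)
              (PySem.Set.add (PySem.List.pyGetD q.2 (ci.2 : Int) PySem.Set.empty)
                (PySem.List.pyGetD pwc (ci.2 : Int) ""))))
        (st.2.1, st.2.2.2.2)
      (hits1, inner.1, plets, badlets, inner.2))
    (PySem.Set.empty, PySem.Set.empty, PySem.Set.empty, PySem.Set.empty,
      List.replicate wchars.length PySem.Set.empty)
  (st.1, st.2.1, wlets, st.2.2.2.1, st.2.2.2.2)

-- ===== PORT B =====
def match_1word_alt (word : String) (pwords : List String) : List String × (List (String × Int)) × List String × List String × List (List String) :=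
  let wchars := pvChars word
  let wlets : PySem.Set String := PySem.Set.ofList wchars
  -- pass 1: all probe letters as one union; hits1 by scanning the word against each probe's set
  let p1 := pwords.foldl
    (fun (p : PySem.Set String × PySem.Set String) pw =>
      let spw : PySem.Set String := PySem.Set.ofList (pvChars pw)
      (PySem.Set.union p.1 spw,
       PySem.Set.update p.2 (wchars.filter (fun c => PySem.Set.contains spw c))))
    (PySem.Set.empty, PySem.Set.empty)
  let badlets := PySem.Set.diff p1.1 wlets
  -- pass 2: positional facts
  let hits2 := pwords.foldl
    (fun (h : PySem.Set (String × Int)) pw =>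
      let pwc := pvChars pw
      PySem.Set.update h (wchars.zipIdx.filterMap (fun ci =>
        if PySem.List.pyGetD pwc (ci.2 : Int) "" = ci.1 then some (ci.1, (ci.2 : Int)) else none)))
    PySem.Set.empty
  let badlets_p := wchars.zipIdx.map (fun ci =>
    PySem.Set.diff
      (PySem.Set.ofList (pwords.map (fun pw => PySem.List.pyGetD (pvChars pw) (ci.2 : Int) "")))
      (PySem.Set.ofList [ci.1]))
  (p1.2, hits2, wlets, badlets, badlets_p)

-- ===== PRECONDITION & SPEC =====
-- Pre_ excludes exactly the inputs where Python A raises IndexError: some probe word shorter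
-- than the target word (A indexes pw[i] for every i < len(word)).
def Pre_match_1word (word : String) (pwords : List String) : Prop :=
  ∀ pw ∈ pwords, word.length ≤ pw.length
instance (word : String) (pwords : List String) : Decidable (Pre_match_1word word pwords) := by
  unfold Pre_match_1word; infer_instance
def pvWitness_match_1word : String × List String := ("ab", ["xb", "ca"])
def Spec_match_1word (word : String) (pwords : List String) (out : List String × (List (String × Int)) × List String × List String × List (List String)) : Prop := out = match_1word_alt word pwords
instance (word : String) (pwords : List String) (out : List String × (List (String × Int)) × List String × List String × List (List String)) : Decidable (Spec_match_1word word pwords out) := by unfold Spec_match_1word; infer_instance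

-- ===== CLAIM (what is proved, stated in full; the proofs are below) =====
def Claim_equal_match_1word : Prop := ∀ (word : String) (pwords : List String), Dom_match_1word word pwords → Pre_match_1word word pwords → Spec_match_1word word pwords (match_1word word pwords)

-- ===== LEMMAS AND PROOFS =====

-- ofList commutes with filter (first-occurrence dedup keeps relative order)
theorem pvOfList_filter {a : Type} [BEq a] [LawfulBEq a] (p : a → Bool) (l : List a) :
    PySem.Set.ofList (l.filter p) = (PySem.Set.ofList l).filter p := by
  induction l using List.reverseRecOn with
  | nil => rfl
  | append_singleton xs x ih =>
    rw [List.filter_append, List.filter_singleton, PySem.Set.ofList_append_singleton]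
    by_cases hp : p x = true
    · simp only [hp, cond_true, PySem.Set.ofList_append_singleton, ih,
        PySem.Set.add_eq_ite]
      by_cases hm : x ∈ PySem.Set.ofList xs
      · rw [if_pos hm, if_pos (List.mem_filter.mpr ⟨hm, hp⟩)]
      · rw [if_neg hm, if_neg (fun h => hm (List.mem_filter.mp h).1), List.filter_append,
          List.filter_singleton]
        simp [hp]
    · simp only [Bool.not_eq_true] at hp
      simp only [hp, cond_false, List.append_nil, ih, PySem.Set.add_eq_ite]
      by_cases hm : x ∈ PySem.Set.ofList xs
      · rw [if_pos hm]
      · rw [if_neg hm, List.filter_append, List.filter_singleton]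
        simp [hp]

-- updating with set(l) is updating with l
theorem pvUpdate_ofList {a : Type} [BEq a] [LawfulBEq a] (s : PySem.Set a) (l : List a) :
    PySem.Set.update s (PySem.Set.ofList l) = PySem.Set.update s l := by
  rw [PySem.Set.update_eq_append_filter, PySem.Set.update_eq_append_filter,
    PySem.Set.ofList_ofList]

-- hits1 step: update with wlets ∩ set(pw) = update with the word letters that occur in pw
theorem pvHits1_step {a : Type} [BEq a] [LawfulBEq a] (s : PySem.Set a) (w t : List a) :
    PySem.Set.update s (PySem.Set.inter (PySem.Set.ofList w) (PySem.Set.ofList t))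
      = PySem.Set.update s (w.filter (fun c => PySem.Set.contains (PySem.Set.ofList t) c)) := by
  show PySem.Set.update s ((PySem.Set.ofList w).filter _) = _
  rw [← pvOfList_filter, pvUpdate_ofList]

-- diff distributes over update
theorem pvDiff_update {a : Type} [BEq a] [LawfulBEq a] (w : PySem.Set a) (l : List a) :
    ∀ s : PySem.Set a, PySem.Set.diff (PySem.Set.update s l) w
      = PySem.Set.update (PySem.Set.diff s w) (l.filter (fun x => !(PySem.Set.contains w x))) := by
  induction l with
  | nil => intro s; rw [PySem.Set.update_nil]; rfl
  | cons x l ih =>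
    intro s
    rw [PySem.Set.update_cons, ih, List.filter_cons]
    have hdiff : PySem.Set.diff (PySem.Set.add s x) w
        = if PySem.Set.contains w x then PySem.Set.diff s w
          else PySem.Set.add (PySem.Set.diff s w) x := by
      by_cases hw : PySem.Set.contains w x = true
      · have hw' : x ∈ w := (PySem.Set.contains_iff w x).mp hw
        by_cases hm : x ∈ s
        · simp [hm, hw']
        · simp [hm, hw', PySem.Set.diff, List.filter_append]
      · have hw' : x ∉ w := fun h => hw ((PySem.Set.contains_iff w x).mpr h)
        by_cases hm : x ∈ s
        · have hmf : x ∈ PySem.Set.diff s w := List.mem_filter.mpr ⟨hm, by simp [hw']⟩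
          simp [hm, hw', hmf]
        · have hmf : x ∉ PySem.Set.diff s w := fun h => hm (List.mem_filter.mp h).1
          simp [hm, hw', PySem.Set.diff, List.filter_append]
    rw [hdiff]
    by_cases hw : PySem.Set.contains w x = true
    · have hw' : x ∈ w := (PySem.Set.contains_iff w x).mp hw
      simp [hw']
    · have hw' : x ∉ w := fun h => hw ((PySem.Set.contains_iff w x).mpr h)
      simp [hw', PySem.Set.update_cons]

-- badlets: A's running update with (set(pw) - wlets) is the difference of the running union
theorem pvBadlets_eq {a : Type} [BEq a] [LawfulBEq a] (w : PySem.Set a) (l : List (List a)) :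
    ∀ s : PySem.Set a,
      l.foldl (fun b t => PySem.Set.update b (PySem.Set.diff (PySem.Set.ofList t) w)) (PySem.Set.diff s w)
        = PySem.Set.diff (l.foldl (fun u t => PySem.Set.union u (PySem.Set.ofList t)) s) w := by
  induction l with
  | nil => intro s; rfl
  | cons t l ih =>
    intro s
    rw [List.foldl_cons, List.foldl_cons]
    have h1 : PySem.Set.update (PySem.Set.diff s w) (PySem.Set.diff (PySem.Set.ofList t) w)
        = PySem.Set.diff (PySem.Set.union s (PySem.Set.ofList t)) w := by
      have hu : PySem.Set.union s (PySem.Set.ofList t) = PySem.Set.update s t := by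
        show PySem.Set.update s (PySem.Set.ofList t) = _
        exact pvUpdate_ofList s t
      rw [hu, pvDiff_update]
      show PySem.Set.update _ ((PySem.Set.ofList t).filter _) = _
      rw [← pvOfList_filter, pvUpdate_ofList]
    rw [h1, ih]

-- a fold of conditional single-element updates is one update with the filterMapped list
theorem pvFoldl_if_update {a b : Type} [BEq b] (l : List a) (P : a → Prop) [DecidablePred P]
    (f : a → b) : ∀ s : PySem.Set b,
    l.foldl (fun s x => if P x then PySem.Set.update s [f x] else s) s
      = PySem.Set.update s (l.filterMap (fun x => if P x then some (f x) else none)) := by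
  induction l with
  | nil => intro s; rw [List.foldl_nil, List.filterMap_nil, PySem.Set.update_nil]
  | cons x l ih =>
    intro s
    rw [List.foldl_cons, List.filterMap_cons]
    by_cases h : P x
    · rw [if_pos h, if_pos h, ih, PySem.Set.update_cons]
      rfl
    · rw [if_neg h, if_neg h, ih]

theorem pvTake_set {a : Type} (l : List a) (k : Nat) (v : a) (h : k < l.length) :
    (l.set k v).take (k + 1) = l.take k ++ [v] := by
  rw [List.set_eq_take_append_cons_drop, if_pos h, List.take_append]
  have hlen : (l.take k).length = k := by simp; omega
  rw [hlen, List.take_of_length_le (by simp [hlen]), Nat.add_sub_cancel_left]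
  simp

-- inner badlets_p loop of A: sets positions k, k+1, … in order
theorem pvInner2_spec (pwc : List String) :
    ∀ (ws : List String) (k : Nat) (blp : List (PySem.Set String)), blp.length = k + ws.length →
    (ws.zipIdx k).foldl
      (fun (q : List (PySem.Set String)) ci =>
        if PySem.List.pyGetD pwc (ci.2 : Int) "" = ci.1 then q
        else PySem.List.pySetD q (ci.2 : Int)
          (PySem.Set.add (PySem.List.pyGetD q (ci.2 : Int) PySem.Set.empty)
            (PySem.List.pyGetD pwc (ci.2 : Int) ""))) blp
    = blp.take k ++ (ws.zipIdx k).map (fun ci =>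
        if PySem.List.pyGetD pwc (ci.2 : Int) "" = ci.1 then blp.getD ci.2 PySem.Set.empty
        else PySem.Set.add (blp.getD ci.2 PySem.Set.empty)
          (PySem.List.pyGetD pwc (ci.2 : Int) "")) := by
  intro ws
  induction ws with
  | nil =>
    intro k blp hlen
    simp only [List.zipIdx_nil, List.foldl_nil, List.map_nil, List.append_nil]
    rw [List.take_of_length_le (by simp at hlen; omega)]
  | cons c ws ih =>
    intro k blp hlen
    have hk : k < blp.length := by simp at hlen ⊢; omega
    rw [List.zipIdx_cons, List.foldl_cons, List.map_cons]
    have hstep : (if PySem.List.pyGetD pwc ((k : Nat) : Int) "" = c then blp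
        else PySem.List.pySetD blp ((k : Nat) : Int)
          (PySem.Set.add (PySem.List.pyGetD blp ((k : Nat) : Int) PySem.Set.empty)
            (PySem.List.pyGetD pwc ((k : Nat) : Int) "")))
        = blp.set k (if PySem.List.pyGetD pwc ((k : Nat) : Int) "" = c
            then blp.getD k PySem.Set.empty
            else PySem.Set.add (blp.getD k PySem.Set.empty)
              (PySem.List.pyGetD pwc ((k : Nat) : Int) "")) := by
      split
      · rw [List.getD_eq_getElem _ _ hk, List.set_getElem_self]
      · rw [PySem.List.pySetD_natCast, PySem.List.pyGetD_natCast]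
    rw [hstep]
    set v := (if PySem.List.pyGetD pwc ((k : Nat) : Int) "" = c
        then blp.getD k PySem.Set.empty
        else PySem.Set.add (blp.getD k PySem.Set.empty)
          (PySem.List.pyGetD pwc ((k : Nat) : Int) "")) with hv
    rw [ih (k + 1) (blp.set k v) (by simp at hlen ⊢; omega)]
    rw [pvTake_set _ _ _ hk]
    rw [List.append_assoc, List.singleton_append]
    congr 2
    apply List.map_congr_left
    intro ci hci
    have h2 : k + 1 ≤ ci.2 := by
      obtain ⟨x, i⟩ := ci
      exact (List.mem_zipIdx hci).1
    have : (blp.set k v).getD ci.2 PySem.Set.empty = blp.getD ci.2 PySem.Set.empty := by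
      rw [List.getD_eq_getElem?_getD, List.getD_eq_getElem?_getD,
        List.getElem?_set_ne (by omega)]
    rw [this]

-- column-wise closed form for each position's bad-letter set
theorem pvColumn_eq (c : String) (colv : String → String) (pwords : List String) :
    pwords.foldl (fun (s : PySem.Set String) pw =>
        if colv pw = c then s else PySem.Set.add s (colv pw)) PySem.Set.empty
      = PySem.Set.diff (PySem.Set.ofList (pwords.map colv)) (PySem.Set.ofList [c]) := by
  have h1 : pwords.foldl (fun (s : PySem.Set String) pw =>
        if colv pw = c then s else PySem.Set.add s (colv pw)) PySem.Set.empty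
      = (pwords.map colv).foldl (fun (s : PySem.Set String) x =>
        if x = c then s else PySem.Set.add s x) PySem.Set.empty := by
    rw [List.foldl_map]
  have h2 : (pwords.map colv).foldl (fun (s : PySem.Set String) x =>
        if x = c then s else PySem.Set.add s x) PySem.Set.empty
      = ((pwords.map colv).filter (fun x => !(x == c))).foldl PySem.Set.add PySem.Set.empty := by
    rw [List.foldl_filter]
    congr 1
    funext s x
    by_cases h : x = c
    · simp [h]
    · simp [h]
  have h3 : PySem.Set.ofList [c] = [c] := rfl
  rw [h1, h2, h3]
  show PySem.Set.ofList _ = _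
  rw [pvOfList_filter]
  show _ = (PySem.Set.ofList (pwords.map colv)).filter _
  apply List.filter_congr
  intro x _
  show (!(x == c)) = !(PySem.Set.contains [c] x)
  simp only [PySem.Set.contains, List.contains_cons, List.contains_nil, Bool.or_false]

-- five independent components of A's fused fold
theorem pvFoldl_prod5 {b A B C D E : Type} (f1 : A → b → A) (f2 : B → b → B) (f3 : C → b → C)
    (f4 : D → b → D) (f5 : E → b → E) (l : List b) :
    ∀ (st : A × B × C × D × E),
    l.foldl (fun st x => (f1 st.1 x, f2 st.2.1 x, f3 st.2.2.1 x, f4 st.2.2.2.1 x, f5 st.2.2.2.2 x)) st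
      = (l.foldl f1 st.1, l.foldl f2 st.2.1, l.foldl f3 st.2.2.1, l.foldl f4 st.2.2.2.1,
         l.foldl f5 st.2.2.2.2) := by
  induction l with
  | nil => intro st; rfl
  | cons x l ih => intro st; rw [List.foldl_cons, ih]; rfl

-- A's inner loop splits into its hits2 part and its badlets_p part
theorem pvInner_split (wch pwc : List String) (h2 : PySem.Set (String × Int))
    (blp : List (PySem.Set String)) :
    wch.zipIdx.foldl
      (fun (q : PySem.Set (String × Int) × List (PySem.Set String)) ci =>
        if PySem.List.pyGetD pwc (ci.2 : Int) "" = ci.1 then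
          (PySem.Set.update q.1 [(ci.1, (ci.2 : Int))], q.2)
        else
          (q.1, PySem.List.pySetD q.2 (ci.2 : Int)
            (PySem.Set.add (PySem.List.pyGetD q.2 (ci.2 : Int) PySem.Set.empty)
              (PySem.List.pyGetD pwc (ci.2 : Int) "")))) (h2, blp)
    = (wch.zipIdx.foldl (fun h ci =>
          if PySem.List.pyGetD pwc (ci.2 : Int) "" = ci.1 then
            PySem.Set.update h [(ci.1, (ci.2 : Int))] else h) h2,
       wch.zipIdx.foldl (fun q ci =>
          if PySem.List.pyGetD pwc (ci.2 : Int) "" = ci.1 then q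
          else PySem.List.pySetD q (ci.2 : Int)
            (PySem.Set.add (PySem.List.pyGetD q (ci.2 : Int) PySem.Set.empty)
              (PySem.List.pyGetD pwc (ci.2 : Int) ""))) blp) := by
  rw [show (fun (q : PySem.Set (String × Int) × List (PySem.Set String)) (ci : String × Nat) =>
        if PySem.List.pyGetD pwc (ci.2 : Int) "" = ci.1 then
          (PySem.Set.update q.1 [(ci.1, (ci.2 : Int))], q.2)
        else
          (q.1, PySem.List.pySetD q.2 (ci.2 : Int)
            (PySem.Set.add (PySem.List.pyGetD q.2 (ci.2 : Int) PySem.Set.empty)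
              (PySem.List.pyGetD pwc (ci.2 : Int) ""))))
      = (fun q ci =>
          ((fun h ci => if PySem.List.pyGetD pwc (ci.2 : Int) "" = ci.1 then
              PySem.Set.update h [(ci.1, (ci.2 : Int))] else h) q.1 ci,
           (fun q ci => if PySem.List.pyGetD pwc (ci.2 : Int) "" = ci.1 then q
            else PySem.List.pySetD q (ci.2 : Int)
              (PySem.Set.add (PySem.List.pyGetD q (ci.2 : Int) PySem.Set.empty)
                (PySem.List.pyGetD pwc (ci.2 : Int) ""))) q.2 ci)) from by
    funext q ci
    split_ifs with h
    · beta_reduce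
      rw [if_pos h, if_pos h]
    · beta_reduce
      rw [if_neg h, if_neg h]]
  exact PySem.List.foldl_prod_mk
    (fun h ci => if PySem.List.pyGetD pwc (ci.2 : Int) "" = ci.1 then
        PySem.Set.update h [(ci.1, (ci.2 : Int))] else h)
    (fun q ci => if PySem.List.pyGetD pwc (ci.2 : Int) "" = ci.1 then q
        else PySem.List.pySetD q (ci.2 : Int)
          (PySem.Set.add (PySem.List.pyGetD q (ci.2 : Int) PySem.Set.empty)
            (PySem.List.pyGetD pwc (ci.2 : Int) "")))
    wch.zipIdx h2 blp

-- value of a map over zipIdx at one of its own index pairs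
theorem pvGetD_map_zipIdx {b : Type} (wch : List String) (f : String × Nat → b) (d : b) :
    ∀ ci ∈ wch.zipIdx, (wch.zipIdx.map f).getD ci.2 d = f ci := by
  rintro ⟨x, i⟩ hci
  obtain ⟨-, hlt, hx⟩ := List.mem_zipIdx hci
  simp only [Nat.zero_add] at hlt
  have hi : i < (wch.zipIdx.map f).length := by simp [hlt]
  rw [List.getD_eq_getElem _ _ hi, List.getElem_map, List.getElem_zipIdx]
  simp only [Nat.zero_add]
  rw [show wch[i] = x from (by simpa using hx.symm)]

-- interchange of A's badlets_p loops: fold of per-probe passes = per-position folds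
theorem pvBlp_eq (wch : List String) (pwords : List String) :
    ∀ f : String × Nat → PySem.Set String,
    pwords.foldl (fun blp pw =>
        wch.zipIdx.foldl (fun q ci =>
          if PySem.List.pyGetD (pvChars pw) (ci.2 : Int) "" = ci.1 then q
          else PySem.List.pySetD q (ci.2 : Int)
            (PySem.Set.add (PySem.List.pyGetD q (ci.2 : Int) PySem.Set.empty)
              (PySem.List.pyGetD (pvChars pw) (ci.2 : Int) ""))) blp)
      (wch.zipIdx.map f)
    = wch.zipIdx.map (fun ci => pwords.foldl (fun s pw =>
        if PySem.List.pyGetD (pvChars pw) (ci.2 : Int) "" = ci.1 then s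
        else PySem.Set.add s (PySem.List.pyGetD (pvChars pw) (ci.2 : Int) "")) (f ci)) := by
  induction pwords with
  | nil => intro f; rfl
  | cons pw pwords ih =>
    intro f
    rw [List.foldl_cons,
      pvInner2_spec (pvChars pw) wch 0 (wch.zipIdx.map f) (by simp),
      List.take_zero, List.nil_append,
      List.map_congr_left (fun ci hci => by
        rw [pvGetD_map_zipIdx wch f PySem.Set.empty ci hci]),
      ih]
    apply List.map_congr_left
    intro ci _
    rw [List.foldl_cons]

-- ===== VERDICT (by name: the statement is the Claim_ definition above) =====
theorem match_1word_spec : Claim_equal_match_1word := by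
  intro word pwords _hdom _hpre
  show match_1word word pwords = match_1word_alt word pwords
  simp only [match_1word, match_1word_alt]
  rw [show (fun (st : PySem.Set String × PySem.Set (String × Int) × PySem.Set String × PySem.Set String × List (PySem.Set String)) (pw : String) =>
      (st.1.update ((PySem.Set.ofList (pvChars word)).inter (PySem.Set.ofList (pvChars pw))),
        (List.foldl (fun (q : PySem.Set (String × Int) × List (PySem.Set String)) ci =>
            if PySem.List.pyGetD (pvChars pw) (ci.2 : Int) "" = ci.1 then (q.1.update [(ci.1, (ci.2 : Int))], q.2)
            else (q.1, PySem.List.pySetD q.2 (ci.2 : Int)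
                ((PySem.List.pyGetD q.2 (ci.2 : Int) PySem.Set.empty).add
                  (PySem.List.pyGetD (pvChars pw) (ci.2 : Int) ""))))
          (st.2.1, st.2.2.2.2) (pvChars word).zipIdx).1,
        st.2.2.1.update (PySem.Set.ofList (pvChars pw)),
        st.2.2.2.1.update ((PySem.Set.ofList (pvChars pw)).diff (PySem.Set.ofList (pvChars word))),
        (List.foldl (fun (q : PySem.Set (String × Int) × List (PySem.Set String)) ci =>
            if PySem.List.pyGetD (pvChars pw) (ci.2 : Int) "" = ci.1 then (q.1.update [(ci.1, (ci.2 : Int))], q.2)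
            else (q.1, PySem.List.pySetD q.2 (ci.2 : Int)
                ((PySem.List.pyGetD q.2 (ci.2 : Int) PySem.Set.empty).add
                  (PySem.List.pyGetD (pvChars pw) (ci.2 : Int) ""))))
          (st.2.1, st.2.2.2.2) (pvChars word).zipIdx).2))
    = (fun st pw =>
      ((fun (h : PySem.Set String) pw => h.update ((PySem.Set.ofList (pvChars word)).inter (PySem.Set.ofList (pvChars pw)))) st.1 pw,
       (fun (h : PySem.Set (String × Int)) pw => (pvChars word).zipIdx.foldl (fun h ci =>
          if PySem.List.pyGetD (pvChars pw) (ci.2 : Int) "" = ci.1 then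
            PySem.Set.update h [(ci.1, (ci.2 : Int))] else h) h) st.2.1 pw,
       (fun (p : PySem.Set String) pw => p.update (PySem.Set.ofList (pvChars pw))) st.2.2.1 pw,
       (fun (b : PySem.Set String) pw => b.update ((PySem.Set.ofList (pvChars pw)).diff (PySem.Set.ofList (pvChars word)))) st.2.2.2.1 pw,
       (fun (blp : List (PySem.Set String)) pw => (pvChars word).zipIdx.foldl (fun q ci =>
          if PySem.List.pyGetD (pvChars pw) (ci.2 : Int) "" = ci.1 then q
          else PySem.List.pySetD q (ci.2 : Int)
            ((PySem.List.pyGetD q (ci.2 : Int) PySem.Set.empty).add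
              (PySem.List.pyGetD (pvChars pw) (ci.2 : Int) ""))) blp) st.2.2.2.2 pw))
    from by
      funext st pw
      rw [pvInner_split]]
  rw [pvFoldl_prod5
    (fun (h : PySem.Set String) pw => h.update ((PySem.Set.ofList (pvChars word)).inter (PySem.Set.ofList (pvChars pw))))
    (fun (h : PySem.Set (String × Int)) pw => (pvChars word).zipIdx.foldl (fun h ci =>
        if PySem.List.pyGetD (pvChars pw) (ci.2 : Int) "" = ci.1 then
          PySem.Set.update h [(ci.1, (ci.2 : Int))] else h) h)
    (fun (p : PySem.Set String) pw => p.update (PySem.Set.ofList (pvChars pw)))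
    (fun (b : PySem.Set String) pw => b.update ((PySem.Set.ofList (pvChars pw)).diff (PySem.Set.ofList (pvChars word))))
    (fun (blp : List (PySem.Set String)) pw => (pvChars word).zipIdx.foldl (fun q ci =>
        if PySem.List.pyGetD (pvChars pw) (ci.2 : Int) "" = ci.1 then q
        else PySem.List.pySetD q (ci.2 : Int)
          ((PySem.List.pyGetD q (ci.2 : Int) PySem.Set.empty).add
            (PySem.List.pyGetD (pvChars pw) (ci.2 : Int) ""))) blp)
    pwords]
  rw [PySem.List.foldl_prod_mk
    (fun (u : PySem.Set String) pw => u.union (PySem.Set.ofList (pvChars pw)))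
    (fun (h : PySem.Set String) pw => h.update ((pvChars word).filter (fun c => (PySem.Set.ofList (pvChars pw)).contains c)))
    pwords PySem.Set.empty PySem.Set.empty]
  dsimp only
  simp only [Prod.mk.injEq]
  refine ⟨?_, ?_, trivial, ?_, ?_⟩
  · -- hits1
    rw [show (fun (h : PySem.Set String) pw => h.update ((PySem.Set.ofList (pvChars word)).inter (PySem.Set.ofList (pvChars pw))))
        = (fun (h : PySem.Set String) pw => h.update ((pvChars word).filter (fun c => (PySem.Set.ofList (pvChars pw)).contains c)))
      from funext fun h => funext fun pw => pvHits1_step h (pvChars word) (pvChars pw)]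
  · -- hits2
    rw [show (fun (h : PySem.Set (String × Int)) pw => (pvChars word).zipIdx.foldl (fun h ci =>
          if PySem.List.pyGetD (pvChars pw) (ci.2 : Int) "" = ci.1 then
            PySem.Set.update h [(ci.1, (ci.2 : Int))] else h) h)
        = (fun (h : PySem.Set (String × Int)) pw => h.update ((pvChars word).zipIdx.filterMap (fun ci =>
            if PySem.List.pyGetD (pvChars pw) (ci.2 : Int) "" = ci.1 then some (ci.1, (ci.2 : Int)) else none)))
      from funext fun h => funext fun pw =>
        pvFoldl_if_update (pvChars word).zipIdx
          (fun ci => PySem.List.pyGetD (pvChars pw) (ci.2 : Int) "" = ci.1)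
          (fun ci => (ci.1, (ci.2 : Int))) h]
  · -- badlets
    have h4 := pvBadlets_eq (PySem.Set.ofList (pvChars word)) (pwords.map pvChars) PySem.Set.empty
    rw [List.foldl_map, List.foldl_map] at h4
    rw [show PySem.Set.diff PySem.Set.empty (PySem.Set.ofList (pvChars word)) = PySem.Set.empty from rfl] at h4
    exact h4
  · -- badlets_p
    rw [show List.replicate (pvChars word).length PySem.Set.empty
        = (pvChars word).zipIdx.map (fun _ => PySem.Set.empty) from by
      rw [List.map_const', List.length_zipIdx]]
    rw [pvBlp_eq]
    exact List.map_congr_left fun ci _ => pvColumn_eq ci.1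
      (fun pw => PySem.List.pyGetD (pvChars pw) (ci.2 : Int) "") pwords
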